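-- pv_equiv track=rewrite | github.com/LukeJGallagher/Athletics_Tilastoptja | Tilasoptija/historical_benchmarks.py | normalize_round
-- ===== SOURCE A (Python) =====
-- ROUND_MAPPINGS = {
--     'final': ['Final', 'final', 'f', 'F'],
--     'semi': ['Semi-Final', 'semi-final', 'sf', 'SF', 's', 'Semi'],
--     'heat': ['Heat', 'heat', 'h', 'H', 'h1', 'h2', 'h3', 'h4', 'h5', 'h6', 'h7', 'h8',
--              'Heat 1', 'Heat 2', 'Heat 3', 'Heat 4', 'Heat 5', 'Heat 6', 'Heat 7', 'Heat 8'],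
--     'qualification': ['Qualification', 'qualification', 'q', 'Q', 'qual']
-- }
--
-- def normalize_round(round_name: str) -> str:
--     """Normalize round name to standard format."""
--     if not round_name:
--         return 'unknown'
--
--     round_lower = str(round_name).lower().strip()
--
--     for standard, variants in ROUND_MAPPINGS.items():
--         if round_name in variants or round_lower in [v.lower() for v in variants]:
--             return standard
--
--     return 'unknown'
-- ===== SOURCE B (Python) =====
-- ROUND_MAPPINGS = {
--     'final': ['Final', 'final', 'f', 'F'],
--     'semi': ['Semi-Final', 'semi-final', 'sf', 'SF', 's', 'Semi'],
--     'heat': ['Heat', 'heat', 'h', 'H', 'h1', 'h2', 'h3', 'h4', 'h5', 'h6', 'h7', 'h8',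
--              'Heat 1', 'Heat 2', 'Heat 3', 'Heat 4', 'Heat 5', 'Heat 6', 'Heat 7', 'Heat 8'],
--     'qualification': ['Qualification', 'qualification', 'q', 'Q', 'qual']
-- }
--
-- # Reverse index built once: lowercased variant -> standard category (earliest category wins).
-- _REVERSE = {}
-- for _standard, _variants in ROUND_MAPPINGS.items():
--     for _v in _variants:
--         _REVERSE.setdefault(_v.lower(), _standard)
--
--
-- def normalize_round(round_name: str) -> str:
--     """Normalize round name to standard format."""
--     if not round_name:
--         return 'unknown'
--     return _REVERSE.get(str(round_name).lower().strip(), 'unknown')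
-- ===== Notes on version B (the rewrite author's own statement) =====
-- stated objective: idiomatic
-- what changed: Replaced A's per-category loop that rescans and re-lowercases every variant list on each call with a module-level reverse dict (lowercased variant -> category, built once with setdefault so the earliest category wins) and a single hash lookup; A's redundant raw-string membership test is dropped since every variant is whitespace-free, so the lowercased/stripped lookup already covers it.
import Mathlib
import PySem

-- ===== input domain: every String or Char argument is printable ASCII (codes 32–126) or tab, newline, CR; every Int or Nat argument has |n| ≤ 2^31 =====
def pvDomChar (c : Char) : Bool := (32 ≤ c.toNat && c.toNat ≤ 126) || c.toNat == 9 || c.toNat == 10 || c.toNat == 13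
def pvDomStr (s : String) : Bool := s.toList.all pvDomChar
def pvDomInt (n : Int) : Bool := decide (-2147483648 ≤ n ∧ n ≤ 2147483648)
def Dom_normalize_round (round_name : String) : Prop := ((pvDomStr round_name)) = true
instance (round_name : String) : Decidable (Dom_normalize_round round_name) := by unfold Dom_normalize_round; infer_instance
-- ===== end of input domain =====

-- B replaces A's per-category loop with scans by a single lookup in a reverse dict
-- (lowercased variant -> category, first category wins), built once; objective: idiomatic/faster lookup.

-- ===== PORT A =====
def ROUND_MAPPINGS : List (String × List String) := [
  ("final", ["Final", "final", "f", "F"]),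
  ("semi", ["Semi-Final", "semi-final", "sf", "SF", "s", "Semi"]),
  ("heat", ["Heat", "heat", "h", "H", "h1", "h2", "h3", "h4", "h5", "h6", "h7", "h8",
            "Heat 1", "Heat 2", "Heat 3", "Heat 4", "Heat 5", "Heat 6", "Heat 7", "Heat 8"]),
  ("qualification", ["Qualification", "qualification", "q", "Q", "qual"])]

-- the 'for standard, variants in ROUND_MAPPINGS.items()' loop with its early return
def nrScan (round_name round_lower : String) : List (String × List String) → String
  | [] => "unknown"
  | (standard, variants) :: rest =>
      if variants.contains round_name || (variants.map PySem.Str.lower).contains round_lower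
      then standard
      else nrScan round_name round_lower rest

def normalize_round (round_name : String) : String :=
  if round_name = "" then "unknown"
  else nrScan round_name (PySem.Str.strip (PySem.Str.lower round_name)) ROUND_MAPPINGS

-- ===== PORT B =====
-- the module-level reverse-index build; 'setdefault' = insert only if the key is absent
def REVERSE : PySem.Dict String String :=
  ROUND_MAPPINGS.foldl (fun d p =>
    p.2.foldl (fun d v =>
      if d.contains (PySem.Str.lower v) then d else d.insert (PySem.Str.lower v) p.1) d)
    PySem.Dict.empty

def normalize_round_alt (round_name : String) : String :=
  if round_name = "" then "unknown"
  else REVERSE.getD (PySem.Str.strip (PySem.Str.lower round_name)) "unknown"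

-- ===== PRECONDITION & SPEC =====
def Spec_normalize_round (round_name : String) (out : String) : Prop := out = normalize_round_alt round_name
instance (round_name : String) (out : String) : Decidable (Spec_normalize_round round_name out) := by unfold Spec_normalize_round; infer_instance

-- ===== CLAIM (what is proved, stated in full; the proofs are below) =====
def Claim_equal_normalize_round : Prop := ∀ (round_name : String), Dom_normalize_round round_name → Spec_normalize_round round_name (normalize_round round_name)

-- ===== LEMMAS AND PROOFS =====

-- REVERSE evaluates to this literal association list
set_option maxRecDepth 4096 in
theorem REVERSE_eq : REVERSE = PySem.Dict.mk [("final","final"),("f","final"),("semi-final","semi"),("sf","semi"),("s","semi"),("semi","semi"),("heat","heat"),("h","heat"),("h1","heat"),("h2","heat"),("h3","heat"),("h4","heat"),("h5","heat"),("h6","heat"),("h7","heat"),("h8","heat"),("heat 1","heat"),("heat 2","heat"),("heat 3","heat"),("heat 4","heat"),("heat 5","heat"),("heat 6","heat"),("heat 7","heat"),("heat 8","heat"),("qualification","qualification"),("q","qualification"),("qual","qualification")] := by decide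

-- A raw-string match in a category implies the lowered/stripped match in the same category,
-- because every variant is whitespace-free; hence A's 'round_name in variants' test is redundant.
theorem raw_final (rn : String) (h : (["Final","final","f","F"] : List String).contains rn = true) :
    ((["Final","final","f","F"] : List String).map PySem.Str.lower).contains (PySem.Str.strip (PySem.Str.lower rn)) = true := by
  simp at h; rcases h with rfl|rfl|rfl|rfl <;> decide

theorem raw_semi (rn : String) (h : (["Semi-Final","semi-final","sf","SF","s","Semi"] : List String).contains rn = true) :
    ((["Semi-Final","semi-final","sf","SF","s","Semi"] : List String).map PySem.Str.lower).contains (PySem.Str.strip (PySem.Str.lower rn)) = true := by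
  simp at h; rcases h with rfl|rfl|rfl|rfl|rfl|rfl <;> decide

theorem raw_heat (rn : String) (h : (["Heat","heat","h","H","h1","h2","h3","h4","h5","h6","h7","h8","Heat 1","Heat 2","Heat 3","Heat 4","Heat 5","Heat 6","Heat 7","Heat 8"] : List String).contains rn = true) :
    ((["Heat","heat","h","H","h1","h2","h3","h4","h5","h6","h7","h8","Heat 1","Heat 2","Heat 3","Heat 4","Heat 5","Heat 6","Heat 7","Heat 8"] : List String).map PySem.Str.lower).contains (PySem.Str.strip (PySem.Str.lower rn)) = true := by
  simp at h; rcases h with rfl|rfl|rfl|rfl|rfl|rfl|rfl|rfl|rfl|rfl|rfl|rfl|rfl|rfl|rfl|rfl|rfl|rfl|rfl|rfl <;> decide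

theorem raw_qual (rn : String) (h : (["Qualification","qualification","q","Q","qual"] : List String).contains rn = true) :
    ((["Qualification","qualification","q","Q","qual"] : List String).map PySem.Str.lower).contains (PySem.Str.strip (PySem.Str.lower rn)) = true := by
  simp at h; rcases h with rfl|rfl|rfl|rfl|rfl <;> decide

-- the pure-lowered scan A reduces to
def nrPure (t : String) : String :=
  if ((["Final","final","f","F"] : List String).map PySem.Str.lower).contains t then "final"
  else if ((["Semi-Final","semi-final","sf","SF","s","Semi"] : List String).map PySem.Str.lower).contains t then "semi"
  else if ((["Heat","heat","h","H","h1","h2","h3","h4","h5","h6","h7","h8","Heat 1","Heat 2","Heat 3","Heat 4","Heat 5","Heat 6","Heat 7","Heat 8"] : List String).map PySem.Str.lower).contains t then "heat"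
  else if ((["Qualification","qualification","q","Q","qual"] : List String).map PySem.Str.lower).contains t then "qualification"
  else "unknown"

theorem scan_eq_pure (rn : String) :
    nrScan rn (PySem.Str.strip (PySem.Str.lower rn)) ROUND_MAPPINGS
      = nrPure (PySem.Str.strip (PySem.Str.lower rn)) := by
  have e1 : ((["Final","final","f","F"] : List String).contains rn
      || ((["Final","final","f","F"] : List String).map PySem.Str.lower).contains (PySem.Str.strip (PySem.Str.lower rn)))
      = ((["Final","final","f","F"] : List String).map PySem.Str.lower).contains (PySem.Str.strip (PySem.Str.lower rn)) := by
    cases h : (["Final","final","f","F"] : List String).contains rn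
    · simp
    · simp only [Bool.true_or]; exact (raw_final rn h).symm
  have e2 : ((["Semi-Final","semi-final","sf","SF","s","Semi"] : List String).contains rn
      || ((["Semi-Final","semi-final","sf","SF","s","Semi"] : List String).map PySem.Str.lower).contains (PySem.Str.strip (PySem.Str.lower rn)))
      = ((["Semi-Final","semi-final","sf","SF","s","Semi"] : List String).map PySem.Str.lower).contains (PySem.Str.strip (PySem.Str.lower rn)) := by
    cases h : (["Semi-Final","semi-final","sf","SF","s","Semi"] : List String).contains rn
    · simp
    · simp only [Bool.true_or]; exact (raw_semi rn h).symm
  have e3 : ((["Heat","heat","h","H","h1","h2","h3","h4","h5","h6","h7","h8","Heat 1","Heat 2","Heat 3","Heat 4","Heat 5","Heat 6","Heat 7","Heat 8"] : List String).contains rn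
      || ((["Heat","heat","h","H","h1","h2","h3","h4","h5","h6","h7","h8","Heat 1","Heat 2","Heat 3","Heat 4","Heat 5","Heat 6","Heat 7","Heat 8"] : List String).map PySem.Str.lower).contains (PySem.Str.strip (PySem.Str.lower rn)))
      = ((["Heat","heat","h","H","h1","h2","h3","h4","h5","h6","h7","h8","Heat 1","Heat 2","Heat 3","Heat 4","Heat 5","Heat 6","Heat 7","Heat 8"] : List String).map PySem.Str.lower).contains (PySem.Str.strip (PySem.Str.lower rn)) := by
    cases h : (["Heat","heat","h","H","h1","h2","h3","h4","h5","h6","h7","h8","Heat 1","Heat 2","Heat 3","Heat 4","Heat 5","Heat 6","Heat 7","Heat 8"] : List String).contains rn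
    · simp
    · simp only [Bool.true_or]; exact (raw_heat rn h).symm
  have e4 : ((["Qualification","qualification","q","Q","qual"] : List String).contains rn
      || ((["Qualification","qualification","q","Q","qual"] : List String).map PySem.Str.lower).contains (PySem.Str.strip (PySem.Str.lower rn)))
      = ((["Qualification","qualification","q","Q","qual"] : List String).map PySem.Str.lower).contains (PySem.Str.strip (PySem.Str.lower rn)) := by
    cases h : (["Qualification","qualification","q","Q","qual"] : List String).contains rn
    · simp
    · simp only [Bool.true_or]; exact (raw_qual rn h).symm
  simp only [ROUND_MAPPINGS, nrScan, nrPure, e1, e2, e3, e4]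

theorem pure_eq_lookup (t : String) : nrPure t = REVERSE.getD t "unknown" := by
  rw [REVERSE_eq]
  by_cases hm : t ∈ (["final","f","semi-final","sf","s","semi","heat","h","h1","h2","h3","h4","h5","h6","h7","h8","heat 1","heat 2","heat 3","heat 4","heat 5","heat 6","heat 7","heat 8","qualification","q","qual"] : List String)
  · simp only [List.mem_cons, List.not_mem_nil, or_false] at hm
    rcases hm with rfl|rfl|rfl|rfl|rfl|rfl|rfl|rfl|rfl|rfl|rfl|rfl|rfl|rfl|rfl|rfl|rfl|rfl|rfl|rfl|rfl|rfl|rfl|rfl|rfl|rfl|rfl <;> decide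
  · simp only [List.mem_cons, List.not_mem_nil, or_false, not_or] at hm
    obtain ⟨h1,h2,h3,h4,h5,h6,h7,h8,h9,h10,h11,h12,h13,h14,h15,h16,h17,h18,h19,h20,h21,h22,h23,h24,h25,h26,h27⟩ := hm
    simp [nrPure, PySem.Dict.getD, PySem.Dict.get?,
      (by decide : PySem.Str.lower "Final" = "final"), (by decide : PySem.Str.lower "final" = "final"), (by decide : PySem.Str.lower "f" = "f"), (by decide : PySem.Str.lower "F" = "f"), (by decide : PySem.Str.lower "Semi-Final" = "semi-final"), (by decide : PySem.Str.lower "semi-final" = "semi-final"), (by decide : PySem.Str.lower "sf" = "sf"), (by decide : PySem.Str.lower "SF" = "sf"), (by decide : PySem.Str.lower "s" = "s"), (by decide : PySem.Str.lower "Semi" = "semi"), (by decide : PySem.Str.lower "Heat" = "heat"), (by decide : PySem.Str.lower "heat" = "heat"), (by decide : PySem.Str.lower "h" = "h"), (by decide : PySem.Str.lower "H" = "h"), (by decide : PySem.Str.lower "h1" = "h1"), (by decide : PySem.Str.lower "h2" = "h2"), (by decide : PySem.Str.lower "h3" = "h3"), (by decide : PySem.Str.lower "h4" = "h4"), (by decide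 : PySem.Str.lower "h5" = "h5"), (by decide : PySem.Str.lower "h6" = "h6"), (by decide : PySem.Str.lower "h7" = "h7"), (by decide : PySem.Str.lower "h8" = "h8"), (by decide : PySem.Str.lower "Heat 1" = "heat 1"), (by decide : PySem.Str.lower "Heat 2" = "heat 2"), (by decide : PySem.Str.lower "Heat 3" = "heat 3"), (by decide : PySem.Str.lower "Heat 4" = "heat 4"), (by decide : PySem.Str.lower "Heat 5" = "heat 5"), (by decide : PySem.Str.lower "Heat 6" = "heat 6"), (by decide : PySem.Str.lower "Heat 7" = "heat 7"), (by decide : PySem.Str.lower "Heat 8" = "heat 8"), (by decide : PySem.Str.lower "Qualification" = "qualification"), (by decide : PySem.Str.lower "qualification" = "qualification"), (by decide : PySem.Str.lower "q" = "q"), (by decide : PySem.Str.lower "Q" = "q"), (by decide : PySem.Str.lower "qual" = "qual"),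
      h1, h2, h3, h4, h5, h6, h7, h8, h9, h10, h11, h12, h13, h14, h15, h16, h17, h18, h19, h20, h21, h22, h23, h24, h25, h26, h27, Ne.symm h1, Ne.symm h2, Ne.symm h3, Ne.symm h4, Ne.symm h5, Ne.symm h6, Ne.symm h7, Ne.symm h8, Ne.symm h9, Ne.symm h10, Ne.symm h11, Ne.symm h12, Ne.symm h13, Ne.symm h14, Ne.symm h15, Ne.symm h16, Ne.symm h17, Ne.symm h18, Ne.symm h19, Ne.symm h20, Ne.symm h21, Ne.symm h22, Ne.symm h23, Ne.symm h24, Ne.symm h25, Ne.symm h26, Ne.symm h27]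
-- ===== VERDICT (by name: the statement is the Claim_ definition above) =====
theorem normalize_round_spec : Claim_equal_normalize_round := by
  intro rn _
  unfold Spec_normalize_round normalize_round normalize_round_alt
  by_cases h : rn = ""
  · simp [h]
  · simp only [h, if_false]
    rw [scan_eq_pure, pure_eq_lookup]
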